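-- pv_equiv track=rewrite | github.com/barbaria888/aurora | server/routes/slack/slack_events_helpers.py | extract_summary_section
-- ===== SOURCE A (Python) =====
-- def extract_summary_section(text: str) -> str:
--     """
--     Extract the summary section from an investigation response.
--     Returns everything before 'Suggested Next Steps', 'Next Steps', 'Recommendations', etc.
--     Handles both the "Current Summary" format and plain responses.
--     """
--     if not text:
--         return ""
--
--     # Section markers that indicate end of summary (most specific first)
--     end_markers = [
--         'Suggested Next Steps',
--         'Next Steps',
--         'Recommendations',
--         'Action Items',
--         'Proposed Actions',
--         'Remediation Steps', #Added the other ones in case the prompt is not followed.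
--     ]
--
--     # Find the earliest end marker
--     earliest_pos = len(text)
--     for marker in end_markers:
--         for prefix in ['', '\n', ' ', '## ', '### ', '#### ', '\n## ', '\n### ', '\n#### ', '* ', '** ', '\n* ', '\n** ']:
--             pattern = prefix + marker
--             pos = text.find(pattern)
--             if pos != -1 and pos < earliest_pos: # Found an earlier end marker
--                 earliest_pos = pos
--
--     # Extract summary content
--     if earliest_pos < len(text):
--         summary = text[:earliest_pos].strip()
--     else:
--         # No markers found - take first 3 paragraphs as fallback
--         paragraphs = text.split('\n\n')
--         summary = '\n\n'.join(paragraphs[:3]).strip()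
--
--     return summary
-- ===== SOURCE B (Python) =====
-- # B: single left-to-right scan with str.startswith over a tuple of all prefix+marker
-- # patterns, instead of A's 6x13 nested str.find loop maintaining a running minimum.
--
-- _END_MARKERS = [
--     'Suggested Next Steps',
--     'Next Steps',
--     'Recommendations',
--     'Action Items',
--     'Proposed Actions',
--     'Remediation Steps',
-- ]
-- _PREFIXES = ['', '\n', ' ', '## ', '### ', '#### ', '\n## ', '\n### ', '\n#### ', '* ', '** ', '\n* ', '\n** ']
-- _PATTERNS = tuple(p + m for m in _END_MARKERS for p in _PREFIXES)
--
--
-- def extract_summary_section(text: str) -> str: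
--     if not text:
--         return ""
--     n = len(text)
--     earliest_pos = next((i for i in range(n) if text.startswith(_PATTERNS, i)), n)
--     if earliest_pos < n:
--         return text[:earliest_pos].strip()
--     paragraphs = text.split('\n\n')
--     return '\n\n'.join(paragraphs[:3]).strip()
-- ===== Notes on version B (the rewrite author's own statement) =====
-- stated objective: simpler
-- what changed: Replaces the 6x13 nested str.find loop that maintains a running minimum with a single left-to-right scan that returns the first position where text.startswith matches any of the 78 precomputed prefix+marker patterns (tuple form of startswith).
import Mathlib
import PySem

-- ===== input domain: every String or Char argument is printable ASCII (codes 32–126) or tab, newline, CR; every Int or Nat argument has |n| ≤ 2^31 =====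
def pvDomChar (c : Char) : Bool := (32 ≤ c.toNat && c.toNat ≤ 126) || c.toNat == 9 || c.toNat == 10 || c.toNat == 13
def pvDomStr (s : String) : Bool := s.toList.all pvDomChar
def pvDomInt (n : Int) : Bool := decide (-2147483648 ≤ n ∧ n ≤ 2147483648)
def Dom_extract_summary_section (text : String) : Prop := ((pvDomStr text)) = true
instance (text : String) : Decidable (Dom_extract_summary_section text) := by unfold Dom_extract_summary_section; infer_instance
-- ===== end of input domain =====

-- B replaces A's 6x13 nested find/min loop by a single left-to-right positional scan
-- over precomputed prefix+marker patterns (objective: simpler; tail logic unchanged).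

-- ===== PORT A =====
def esMarkersA : List (List Char) :=
  ["Suggested Next Steps".toList, "Next Steps".toList, "Recommendations".toList,
   "Action Items".toList, "Proposed Actions".toList, "Remediation Steps".toList]

def esPrefixesA : List (List Char) :=
  ["".toList, "\n".toList, " ".toList, "## ".toList, "### ".toList, "#### ".toList,
   "\n## ".toList, "\n### ".toList, "\n#### ".toList, "* ".toList, "** ".toList,
   "\n* ".toList, "\n** ".toList]

def extract_summary_section (text : String) : String :=
  if text.toList = [] then ""
  else
    let L := text.toList
    let earliest : Int := esMarkersA.foldl (fun acc m =>
        esPrefixesA.foldl (fun acc p =>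
          let pos := PySem.Chars.find L (p ++ m)
          if pos ≠ -1 ∧ pos < acc then pos else acc) acc) (L.length : Int)
    if earliest < (L.length : Int) then
      String.ofList (PySem.Chars.strip (PySem.Chars.slice L none (some earliest)))
    else
      String.ofList (PySem.Chars.strip (PySem.Chars.join "\n\n".toList
        (PySem.List.slice (PySem.Chars.splitOn L "\n\n".toList) none (some 3))))

-- ===== PORT B =====
def esMarkersB : List String :=
  ["Suggested Next Steps", "Next Steps", "Recommendations",
   "Action Items", "Proposed Actions", "Remediation Steps"]

def esPrefixesB : List String :=
  ["", "\n", " ", "## ", "### ", "#### ", "\n## ", "\n### ", "\n#### ", "* ", "** ", "\n* ", "\n** "]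

def esPatterns : List (List Char) :=
  esMarkersB.flatMap (fun m => esPrefixesB.map (fun p => p.toList ++ m.toList))

-- text.startswith(_PATTERNS, i): positions 0..n-1 left to right, first hit wins
def esScan (pats : List (List Char)) : List Char → Nat → Option Nat
  | [], _ => none
  | s@(_ :: t), j => if pats.any (fun p => PySem.Chars.startswith s p) then some j else esScan pats t (j+1)

def extract_summary_section_alt (text : String) : String :=
  if text.toList = [] then ""
  else
    let L := text.toList
    let n := L.length
    let earliest : Nat := (esScan esPatterns L 0).getD n
    if earliest < n then
      String.ofList (PySem.Chars.strip (PySem.Chars.slice L none (some (earliest : Int))))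
    else
      String.ofList (PySem.Chars.strip (PySem.Chars.join "\n\n".toList
        (PySem.List.slice (PySem.Chars.splitOn L "\n\n".toList) none (some 3))))

-- ===== PRECONDITION & SPEC =====
def Spec_extract_summary_section (text : String) (out : String) : Prop := out = extract_summary_section_alt text
instance (text : String) (out : String) : Decidable (Spec_extract_summary_section text out) := by unfold Spec_extract_summary_section; infer_instance

-- ===== CLAIM (what is proved, stated in full; the proofs are below) =====
def Claim_equal_extract_summary_section : Prop := ∀ (text : String), Dom_extract_summary_section text → Spec_extract_summary_section text (extract_summary_section text)

-- ===== LEMMAS AND PROOFS =====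

-- A's per-pattern update step (the body of its inner loop)
def esStep (L : List Char) (acc : Int) (q : List Char) : Int :=
  let pos := PySem.Chars.find L q
  if pos ≠ -1 ∧ pos < acc then pos else acc

-- "some pattern matches at the start of t"
def esHit (pats : List (List Char)) (t : List Char) : Prop :=
  pats.any (fun p => PySem.Chars.startswith t p) = true

theorem esHit_iff (pats : List (List Char)) (t : List Char) :
    esHit pats t ↔ ∃ q ∈ pats, q <+: t := by
  simp [esHit, List.any_eq_true, PySem.Chars.startswith_iff]

-- A's nested loop is a single fold over the combined pattern list
theorem es_foldl_nested (g : Int → List Char → Int) (ms ps : List (List Char)) (init : Int) :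
    ms.foldl (fun a m => ps.foldl (fun a p => g a (p ++ m)) a) init
    = (ms.flatMap (fun m => ps.map (fun p => p ++ m))).foldl g init := by
  induction ms generalizing init with
  | nil => rfl
  | cons m ms ih => simp [List.foldl_append, List.foldl_map, ih]

theorem es_patterns_eq :
    esMarkersA.flatMap (fun m => esPrefixesA.map (fun p => p ++ m)) = esPatterns := by decide

theorem es_patterns_ne_nil : ∀ q ∈ esPatterns, q ≠ [] := by decide

-- A's fold computes a minimum: invariant of the running minimum
theorem fold_min_spec (L : List Char) : ∀ (qs : List (List Char)) (acc : Int),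
    (qs.foldl (esStep L) acc = acc ∨
      ∃ q ∈ qs, PySem.Chars.find L q = qs.foldl (esStep L) acc ∧ qs.foldl (esStep L) acc ≠ -1) ∧
    qs.foldl (esStep L) acc ≤ acc ∧
    ∀ q ∈ qs, PySem.Chars.find L q ≠ -1 → qs.foldl (esStep L) acc ≤ PySem.Chars.find L q := by
  intro qs
  induction qs with
  | nil => intro acc; exact ⟨Or.inl rfl, le_refl _, by simp⟩
  | cons q0 qs ih =>
    intro acc
    obtain ⟨h1, h2, h3⟩ := ih (esStep L acc q0)
    simp only [List.foldl_cons]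
    by_cases hc : PySem.Chars.find L q0 ≠ -1 ∧ PySem.Chars.find L q0 < acc
    · have hstep : esStep L acc q0 = PySem.Chars.find L q0 := by simp [esStep, hc]
      rw [hstep] at h1 h2 ⊢
      refine ⟨?_, by omega, ?_⟩
      · rcases h1 with h1 | ⟨q', hq', he, hne⟩
        · exact Or.inr ⟨q0, by simp, by rw [h1], by rw [h1]; exact hc.1⟩
        · exact Or.inr ⟨q', by simp [hq'], he, hne⟩
      · intro q' hq' hne
        rcases List.mem_cons.mp hq' with rfl | hq'
        · exact h2
        · rw [hstep] at h3; exact h3 q' hq' hne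
    · have hstep : esStep L acc q0 = acc := by
        simp only [esStep]; rw [if_neg hc]
      rw [hstep] at h1 h2 h3 ⊢
      refine ⟨?_, h2, ?_⟩
      · rcases h1 with h1 | ⟨q', hq', he, hne⟩
        · exact Or.inl h1
        · exact Or.inr ⟨q', by simp [hq'], he, hne⟩
      · intro q' hq' hne
        rcases List.mem_cons.mp hq' with rfl | hq'
        · have : ¬ PySem.Chars.find L q' < acc := fun hlt => hc ⟨hne, hlt⟩
          omega
        · exact h3 q' hq' hne

-- B's scan returns the first matching position
theorem scan_some (pats : List (List Char)) : ∀ (s : List Char) (j r : Nat),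
    esScan pats s j = some r →
    j ≤ r ∧ r - j < s.length ∧ esHit pats (s.drop (r - j)) ∧ ∀ i < r - j, ¬ esHit pats (s.drop i) := by
  intro s
  induction s with
  | nil => intro j r h; simp [esScan] at h
  | cons c t ih =>
    intro j r h
    rw [esScan] at h
    split at h
    · rename_i hh
      cases h
      refine ⟨Nat.le_refl _, by simp, ?_, ?_⟩
      · simpa [esHit] using hh
      · intro i hi; omega
    · rename_i hh
      obtain ⟨h1, h2, h3, h4⟩ := ih (j+1) r h
      refine ⟨by omega, by simp; omega, ?_, ?_⟩
      · have : (c :: t).drop (r - j) = t.drop (r - (j+1)) := by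
          have : r - j = (r - (j+1)) + 1 := by omega
          simp [this]
        rw [this]; exact h3
      · intro i hi
        cases i with
        | zero => simpa [esHit] using hh
        | succ i' =>
          have := h4 i' (by omega)
          simpa using this

theorem scan_none (pats : List (List Char)) : ∀ (s : List Char) (j : Nat),
    esScan pats s j = none → ∀ i < s.length, ¬ esHit pats (s.drop i) := by
  intro s
  induction s with
  | nil => intro j h i hi; simp at hi
  | cons c t ih =>
    intro j h i hi
    rw [esScan] at h
    split at h
    · simp at h
    · rename_i hh
      cases i with
      | zero => simpa [esHit] using hh
      | succ i' =>
        have := ih (j+1) h i' (by simpa using hi)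
        simpa using this

-- the two earliest-marker positions coincide
theorem earliest_eq (L : List Char) (pats : List (List Char)) (hpne : ∀ q ∈ pats, q ≠ []) :
    pats.foldl (esStep L) (L.length : Int) = (((esScan pats L 0).getD L.length : Nat) : Int) := by
  obtain ⟨h1, h2, h3⟩ := fold_min_spec L pats (L.length : Int)
  cases hscan : esScan pats L 0 with
  | none =>
    simp only [Option.getD_none]
    have hall : ∀ q ∈ pats, PySem.Chars.find L q = -1 := by
      intro q hq
      by_contra hne
      have h0 : 0 ≤ PySem.Chars.find L q := by have := PySem.Chars.neg_one_le_find L q; omega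
      obtain ⟨hpref, -⟩ := PySem.Chars.find_spec h0
      by_cases hlt : (PySem.Chars.find L q).toNat < L.length
      · exact scan_none pats L 0 hscan _ hlt ((esHit_iff pats _).mpr ⟨q, hq, hpref⟩)
      · have : L.drop (PySem.Chars.find L q).toNat = [] := by
          apply List.drop_eq_nil_of_le; omega
        rw [this] at hpref
        exact hpne q hq (List.prefix_nil.mp hpref)
    rcases h1 with h1 | ⟨q, hq, he, hne⟩
    · exact h1
    · exact absurd (hall q hq ▸ he).symm hne
  | some r =>
    simp only [Option.getD_some]
    obtain ⟨-, hrlen, hhit, hmin⟩ := scan_some pats L 0 r hscan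
    simp only [Nat.sub_zero] at hrlen hhit hmin
    obtain ⟨q0, hq0, hpref0⟩ := (esHit_iff pats _).mp hhit
    have hne0 : PySem.Chars.find L q0 ≠ -1 := by
      rw [PySem.Chars.find_ne_neg_one_iff, ← PySem.Chars.isIn_iff_infix,
        ← PySem.Chars.exists_prefix_drop_iff_isIn]
      exact ⟨r, hpref0⟩
    have h00 : 0 ≤ PySem.Chars.find L q0 := by have := PySem.Chars.neg_one_le_find L q0; omega
    obtain ⟨-, hmin0⟩ := PySem.Chars.find_spec h00
    have hfle : (PySem.Chars.find L q0).toNat ≤ r := by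
      by_contra hgt
      exact hmin0 r (by omega) hpref0
    have hfold_le : pats.foldl (esStep L) (L.length : Int) ≤ r := by
      have := h3 q0 hq0 hne0
      omega
    rcases h1 with h1 | ⟨q', hq', he', hne'⟩
    · omega
    · have h0' : 0 ≤ PySem.Chars.find L q' := by have := PySem.Chars.neg_one_le_find L q'; omega
      obtain ⟨hpref', -⟩ := PySem.Chars.find_spec h0'
      have hhit' : esHit pats (L.drop (PySem.Chars.find L q').toNat) :=
        (esHit_iff pats _).mpr ⟨q', hq', hpref'⟩
      have hge : r ≤ (PySem.Chars.find L q').toNat := by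
        by_contra hlt
        exact hmin _ (by omega) hhit'
      omega

theorem es_main (text : String) : extract_summary_section text = extract_summary_section_alt text := by
  unfold extract_summary_section extract_summary_section_alt
  by_cases h0 : text.toList = []
  · simp [h0]
  · rw [if_neg h0, if_neg h0]
    have hA : text.toList.length = text.toList.length := rfl
    have hfold :
        esMarkersA.foldl (fun acc m =>
          esPrefixesA.foldl (fun acc p =>
            let pos := PySem.Chars.find text.toList (p ++ m)
            if pos ≠ -1 ∧ pos < acc then pos else acc) acc) (text.toList.length : Int)
        = ((((esScan esPatterns text.toList 0).getD text.toList.length : Nat)) : Int) := by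
      rw [show (fun (acc : Int) (m : List Char) =>
          esPrefixesA.foldl (fun acc p =>
            let pos := PySem.Chars.find text.toList (p ++ m)
            if pos ≠ -1 ∧ pos < acc then pos else acc) acc)
        = (fun (a : Int) (m : List Char) =>
            esPrefixesA.foldl (fun a p => esStep text.toList a (p ++ m)) a) from rfl]
      rw [es_foldl_nested (esStep text.toList) esMarkersA esPrefixesA]
      rw [es_patterns_eq]
      exact earliest_eq text.toList esPatterns es_patterns_ne_nil
    simp only [hfold]
    by_cases hlt : ((esScan esPatterns text.toList 0).getD text.toList.length) < text.toList.length
    · rw [if_pos (by exact_mod_cast hlt), if_pos hlt]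
    · rw [if_neg (by exact_mod_cast hlt), if_neg hlt]

-- ===== VERDICT (by name: the statement is the Claim_ definition above) =====
theorem extract_summary_section_spec : Claim_equal_extract_summary_section := by
  intro text _
  unfold Spec_extract_summary_section
  exact es_main text
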